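-- pv_equiv track=rewrite | github.com/XiplusChenyu/Document-Classification-Web-Service | FlaskApi/FileUtils.py | divide_sentence
-- ===== SOURCE A (Python) =====
-- def divide_sentence(words, seq_size):
--     """
--     divide sentence & padding
--     :param words: document
--     :param seq_size: chunk size
--     :return: list of chunks
--     """
--     if len(words) <= seq_size:
--         res = [words + [1 for x in range(seq_size - len(words))]]
--     else:
--         remain = list(words)  # don't operate inplace
--         res = list()
--
--         while remain:
--             add, remain = remain[:seq_size], remain[seq_size:]
--             if len(add) < seq_size // 3:
--                 break
--             elif len(add) < seq_size:
--                 add = add + [1 for x in range(seq_size - len(add))]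
--             res.append(add)
--     return res
-- ===== SOURCE B (Python) =====
-- def divide_sentence(words, seq_size):
--     """
--     divide sentence & padding: two-phase version — count full chunks with divmod,
--     emit them directly, then decide the remainder tail in a separate post-pass.
--     """
--     if len(words) <= seq_size:
--         return [words + [1] * (seq_size - len(words))]
--     q, r = divmod(len(words), seq_size)
--     res = [words[i * seq_size:(i + 1) * seq_size] for i in range(q)]
--     if r != 0 and r >= seq_size // 3:
--         res.append(words[q * seq_size:] + [1] * (seq_size - r))
--     return res
-- ===== Notes on version B (the rewrite author's own statement) =====
-- stated objective: alternative
-- what changed: A's while loop repeatedly re-slices and tests the remaining list with a break; B computes the full-chunk count with one divmod, emits all full chunks as direct index slices of the input, and decides the padded/dropped remainder in a separate post-pass.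
import Mathlib
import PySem

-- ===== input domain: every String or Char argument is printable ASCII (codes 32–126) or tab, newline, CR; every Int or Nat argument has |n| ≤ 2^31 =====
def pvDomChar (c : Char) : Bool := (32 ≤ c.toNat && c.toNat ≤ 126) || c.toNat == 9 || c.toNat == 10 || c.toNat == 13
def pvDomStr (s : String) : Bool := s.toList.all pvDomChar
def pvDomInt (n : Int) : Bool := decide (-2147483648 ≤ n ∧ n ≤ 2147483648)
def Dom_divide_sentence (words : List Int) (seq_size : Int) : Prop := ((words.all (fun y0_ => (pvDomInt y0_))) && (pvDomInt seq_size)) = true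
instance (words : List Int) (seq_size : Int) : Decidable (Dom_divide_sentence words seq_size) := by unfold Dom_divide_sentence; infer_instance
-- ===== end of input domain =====

-- B replaces A's slice-and-break while loop by a divmod-counted chunk comprehension plus a
-- separate remainder post-pass (alternative decomposition; no repeated copying of the remaining list).


-- ===== PORT A =====
-- the while loop, with fuel (on every input admitted by Pre_ the Python loop terminates,
-- consuming at least one element per iteration, so words.length + 1 fuel is never exhausted)
def dsLoopA (seq_size : Int) : Nat → List Int → List (List Int) → List (List Int)
  | 0, _, res => res
  | fuel+1, remain, res =>
    if remain = [] then res
    else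
      let add := PySem.List.slice remain none (some seq_size)
      let remain' := PySem.List.slice remain (some seq_size) none
      if (add.length : Int) < PySem.Int.floordiv seq_size 3 then res
      else
        let add' := if (add.length : Int) < seq_size then
            add ++ (PySem.List.pyRange 0 (seq_size - add.length) 1).map (fun _ => (1 : Int))
          else add
        dsLoopA seq_size fuel remain' (res ++ [add'])

def divide_sentence (words : List Int) (seq_size : Int) : List (List Int) :=
  if (words.length : Int) ≤ seq_size then
    [words ++ (PySem.List.pyRange 0 (seq_size - words.length) 1).map (fun _ => (1 : Int))]
  else
    dsLoopA seq_size (words.length + 1) words []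

-- ===== PORT B =====
def divide_sentence_alt (words : List Int) (seq_size : Int) : List (List Int) :=
  if (words.length : Int) ≤ seq_size then
    [words ++ List.replicate (seq_size - words.length).toNat (1 : Int)]
  else
    match PySem.Int.divmod? (words.length : Int) seq_size with
    | none => []  -- ZeroDivisionError in Python B; excluded by Pre_ (seq_size = 0 with words ≠ [])
    | some (q, r) =>
      let res := (PySem.List.pyRange 0 q 1).map
        (fun i => PySem.List.slice words (some (i * seq_size)) (some ((i + 1) * seq_size)))
      if r ≠ 0 ∧ PySem.Int.floordiv seq_size 3 ≤ r then
        res ++ [PySem.List.slice words (some (q * seq_size)) none ++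
                List.replicate (seq_size - r).toNat (1 : Int)]
      else res

-- ===== PRECONDITION & SPEC =====
-- A diverges (the while loop never terminates) whenever words ≠ [] and seq_size ≤ 0; those inputs are excluded.
def Pre_divide_sentence (words : List Int) (seq_size : Int) : Prop :=
  words = [] ∨ 1 ≤ seq_size
instance (words : List Int) (seq_size : Int) : Decidable (Pre_divide_sentence words seq_size) := by
  unfold Pre_divide_sentence; infer_instance
def pvWitness_divide_sentence : List Int × Int := ([3, 1, 4, 1, 5], 2)

def Spec_divide_sentence (words : List Int) (seq_size : Int) (out : List (List Int)) : Prop := out = divide_sentence_alt words seq_size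
instance (words : List Int) (seq_size : Int) (out : List (List Int)) : Decidable (Spec_divide_sentence words seq_size out) := by unfold Spec_divide_sentence; infer_instance

-- ===== CLAIM (what is proved, stated in full; the proofs are below) =====
def Claim_equal_divide_sentence : Prop := ∀ (words : List Int) (seq_size : Int), Dom_divide_sentence words seq_size → Pre_divide_sentence words seq_size → Spec_divide_sentence words seq_size (divide_sentence words seq_size)

-- ===== LEMMAS AND PROOFS =====

lemma pad_eq (m : Int) :
    (PySem.List.pyRange 0 m 1).map (fun _ => (1:Int)) = List.replicate m.toNat 1 := by
  rw [PySem.List.pyRange_one]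
  simp [Function.comp_def, List.map_const']

lemma fd3 (k : Nat) : PySem.Int.floordiv (k:Int) 3 = ((k/3 : Nat) : Int) := by
  exact_mod_cast PySem.Int.floordiv_natCast k 3

lemma divmod_nat (n k : Nat) (hk : k ≠ 0) :
    PySem.Int.divmod? (n:Int) (k:Int) = some (((n/k : Nat) : Int), ((n%k : Nat) : Int)) := by
  simp [PySem.Int.divmod?, hk, Int.fdiv_eq_ediv, Int.fmod_eq_emod]

lemma divmod_zero (s : Int) (hs : s ≠ 0) :
    PySem.Int.divmod? 0 s = some ((0:Int), (0:Int)) := by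
  simp [PySem.Int.divmod?, hs]

lemma loopA_nil (s : Int) (res : List (List Int)) :
    ∀ fuel, dsLoopA s fuel [] res = res := by
  intro fuel; cases fuel <;> simp [dsLoopA]

-- invariant of A's while loop for a positive chunk size, phrased over Nat
lemma loopA_spec (k r0 : Nat) (hk : 1 ≤ k) (hr : r0 < k) :
    ∀ (q : Nat) (rem : List Int) (res : List (List Int)) (fuel : Nat),
      rem.length = q * k + r0 → rem.length + 1 ≤ fuel →
      dsLoopA (k : Int) fuel rem res =
        res ++ ((List.range q).map (fun i => (rem.drop (i*k)).take k) ++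
          (if r0 = 0 then [] else if r0 < k / 3 then []
           else [rem.drop (q*k) ++ List.replicate (k - r0) (1:Int)])) := by
  intro q
  induction q with
  | zero =>
    intro rem res fuel hlen hfuel
    simp only [Nat.zero_mul, Nat.zero_add] at hlen
    obtain ⟨f, rfl⟩ : ∃ f, fuel = f + 1 := ⟨fuel - 1, by omega⟩
    by_cases h0 : r0 = 0
    · have : rem = [] := by
        cases rem with
        | nil => rfl
        | cons a t => simp at hlen; omega
      subst this
      simp [dsLoopA, h0]
    · have hne : rem ≠ [] := by
        intro h; subst h; simp at hlen; omega
      have htake : PySem.List.slice rem none (some (k:Int)) = rem := by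
        rw [PySem.List.slice_to_natCast, List.take_of_length_le (by omega)]
      have hdrop : PySem.List.slice rem (some (k:Int)) none = [] := by
        rw [PySem.List.slice_from_natCast, List.drop_eq_nil_of_le (by omega)]
      by_cases hbr : r0 < k / 3
      · have hc : ((rem.length : Int) < PySem.Int.floordiv (k:Int) 3) := by
          rw [fd3, hlen]; exact_mod_cast hbr
        rw [dsLoopA, if_neg hne]
        simp only [htake, hdrop]
        rw [if_pos hc]
        simp [h0, hbr]
      · have hc : ¬ ((rem.length : Int) < PySem.Int.floordiv (k:Int) 3) := by
          rw [fd3, hlen]; exact_mod_cast hbr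
        have hpadc : ((rem.length : Int) < (k:Int)) := by rw [hlen]; exact_mod_cast hr
        rw [dsLoopA, if_neg hne]
        simp only [htake, hdrop]
        rw [if_neg hc, if_pos hpadc, loopA_nil, pad_eq]
        have hrep : ((k:Int) - (rem.length:Int)).toNat = k - r0 := by omega
        rw [hrep]
        simp [h0, hbr]
  | succ q ih =>
    intro rem res fuel hlen hfuel
    rw [Nat.succ_mul] at hlen
    obtain ⟨f, rfl⟩ : ∃ f, fuel = f + 1 := ⟨fuel - 1, by omega⟩
    have hne : rem ≠ [] := by
      intro h; subst h; simp at hlen; omega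
    have hkle : k ≤ rem.length := by omega
    have htake : PySem.List.slice rem none (some (k:Int)) = rem.take k :=
      PySem.List.slice_to_natCast rem k
    have hdrop : PySem.List.slice rem (some (k:Int)) none = rem.drop k :=
      PySem.List.slice_from_natCast rem k
    have hlt : (rem.take k).length = k := by simp; omega
    have hc : ¬ (((rem.take k).length : Int) < PySem.Int.floordiv (k:Int) 3) := by
      rw [fd3, hlt]; exact_mod_cast (by omega : ¬ (k < k/3))
    have hpadc : ¬ (((rem.take k).length : Int) < (k:Int)) := by
      rw [hlt]; omega
    rw [dsLoopA, if_neg hne]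
    simp only [htake, hdrop]
    rw [if_neg hc, if_neg hpadc]
    rw [ih (rem.drop k) (res ++ [rem.take k]) f (by simp; omega) (by simp; omega)]
    have hmap : (List.range q).map (fun i => ((rem.drop k).drop (i*k)).take k)
        = (List.range q).map (fun i => (rem.drop ((i+1)*k)).take k) := by
      apply List.map_congr_left
      intro i _
      rw [List.drop_drop]
      congr 2
      ring
    have hdd : (rem.drop k).drop (q*k) = rem.drop ((q+1)*k) := by
      rw [List.drop_drop]; congr 1; ring
    rw [hmap, hdd]
    rw [List.range_succ_eq_map]
    simp [List.append_assoc, Function.comp_def, Nat.succ_eq_add_one]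

-- B's else branch, phrased over Nat in the same shape as loopA_spec's right-hand side
lemma alt_spec (words : List Int) (k : Nat) (hk : 1 ≤ k) (hlen : k < words.length) :
    divide_sentence_alt words (k:Int) =
      (List.range (words.length / k)).map (fun i => (words.drop (i*k)).take k) ++
      (if words.length % k = 0 then [] else if words.length % k < k/3 then []
       else [words.drop ((words.length / k)*k) ++ List.replicate (k - words.length % k) (1:Int)]) := by
  have hk0 : k ≠ 0 := by omega
  have hnle : ¬ ((words.length : Int) ≤ (k:Int)) := by exact_mod_cast Nat.not_le.mpr hlen
  unfold divide_sentence_alt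
  rw [if_neg hnle, divmod_nat words.length k hk0]
  simp only [PySem.List.pyRange_zero_nat, List.map_map]
  have hmap : (List.range (words.length / k)).map
      ((fun i => PySem.List.slice words (some (i * (k:Int))) (some ((i + 1) * (k:Int)))) ∘ (fun i : Nat => (i:Int)))
      = (List.range (words.length / k)).map (fun i => (words.drop (i*k)).take k) := by
    apply List.map_congr_left
    intro i _
    have h1 : (i:Int) * (k:Int) = ((i*k : Nat) : Int) := by push_cast; ring
    have h2 : ((i:Int) + 1) * (k:Int) = (((i+1)*k : Nat) : Int) := by push_cast; ring
    simp only [Function.comp_apply, h1, h2, PySem.List.slice_natCast]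
    congr 1
    rw [Nat.succ_mul]
    omega
  rw [hmap, fd3]
  by_cases hr0 : words.length % k = 0
  · simp [hr0]
  · by_cases hbr : words.length % k < k / 3
    · rw [if_neg (by push_cast; omega), if_neg hr0, if_pos hbr]
      exact (List.append_nil _).symm
    · rw [if_pos ⟨by exact_mod_cast hr0, by exact_mod_cast Nat.not_lt.mp hbr⟩,
        if_neg hr0, if_neg hbr]
      have h1 : ((words.length / k : Nat):Int) * (k:Int) = ((words.length / k * k : Nat) : Int) := by
        push_cast; ring
      rw [h1, PySem.List.slice_from_natCast]
      have h2 : ((k:Int) - ((words.length % k : Nat) : Int)).toNat = k - words.length % k := by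
        have := Nat.mod_lt words.length (show 0 < k by omega)
        omega
      rw [h2]

-- ===== VERDICT (by name: the statement is the Claim_ definition above) =====
theorem divide_sentence_spec : Claim_equal_divide_sentence := by
  intro words s _ hpre
  unfold Spec_divide_sentence
  by_cases hle : (words.length : Int) ≤ s
  · simp [divide_sentence, divide_sentence_alt, hle]
  · rcases hpre with hw | hs
    · subst hw
      have hs0 : s ≠ 0 := by simp at hle; omega
      simp [divide_sentence, divide_sentence_alt, dsLoopA, divmod_zero s hs0,
        PySem.List.pyRange_one, Function.comp_def, List.map_const']
    · lift s to Nat using (by omega : (0:Int) ≤ s) with k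
      have hk : 1 ≤ k := by exact_mod_cast hs
      have hlt : k < words.length := by exact_mod_cast not_le.mp hle
      unfold divide_sentence
      rw [if_neg hle]
      rw [loopA_spec k (words.length % k) hk (Nat.mod_lt _ (by omega)) (words.length / k)
        words [] (words.length + 1) (Nat.div_add_mod' _ _).symm (by omega)]
      rw [alt_spec words k hk hlt]
      simp
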